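-- pv_equiv track=rewrite | github.com/Kunritty/connections-solver | conn/metrics.py | n_correct_groups
-- ===== SOURCE A (Python) =====
-- from itertools import permutations
--
-- def _norm(g: list) -> frozenset:
--     return frozenset(w.strip().upper() for w in g)
--
-- def n_correct_groups(pred_groups: list[list[str]], gold_groups: list[list[str]]) -> int:
--     """Number of predicted groups that exactly match some gold group (best permutation)."""
--     if not pred_groups or len(pred_groups) != 4 or len(gold_groups) != 4:
--         return 0
--     if any(len(g) != 4 for g in pred_groups) or any(len(g) != 4 for g in gold_groups):
--         return 0
--     pred_sets = [_norm(g) for g in pred_groups]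
--     gold_sets = [_norm(g) for g in gold_groups]
--     return max(
--         sum(1 for j in range(4) if pred_sets[j] == gold_sets[pi[j]])
--         for pi in permutations(range(4))
--     )
-- ===== SOURCE B (Python) =====
-- def _norm(g: list) -> frozenset:
--     return frozenset(w.strip().upper() for w in g)
--
-- def n_correct_groups(pred_groups: list[list[str]], gold_groups: list[list[str]]) -> int:
--     """Number of predicted groups that exactly match some gold group (best permutation)."""
--     if not pred_groups or len(pred_groups) != 4 or len(gold_groups) != 4:
--         return 0
--     if any(len(g) != 4 for g in pred_groups) or any(len(g) != 4 for g in gold_groups):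
--         return 0
--     gold_left = [_norm(g) for g in gold_groups]
--     n = 0
--     for g in pred_groups:
--         s = _norm(g)
--         if s in gold_left:
--             gold_left.remove(s)
--             n += 1
--     return n
-- ===== Notes on version B (the rewrite author's own statement) =====
-- stated objective: simpler
-- what changed: Replaces the max over all 24 permutations of 4x4 match counts with a single greedy multiset-intersection pass that removes each matched gold set once; this equals the best-permutation match count because set equality partitions the groups.
import Mathlib
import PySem

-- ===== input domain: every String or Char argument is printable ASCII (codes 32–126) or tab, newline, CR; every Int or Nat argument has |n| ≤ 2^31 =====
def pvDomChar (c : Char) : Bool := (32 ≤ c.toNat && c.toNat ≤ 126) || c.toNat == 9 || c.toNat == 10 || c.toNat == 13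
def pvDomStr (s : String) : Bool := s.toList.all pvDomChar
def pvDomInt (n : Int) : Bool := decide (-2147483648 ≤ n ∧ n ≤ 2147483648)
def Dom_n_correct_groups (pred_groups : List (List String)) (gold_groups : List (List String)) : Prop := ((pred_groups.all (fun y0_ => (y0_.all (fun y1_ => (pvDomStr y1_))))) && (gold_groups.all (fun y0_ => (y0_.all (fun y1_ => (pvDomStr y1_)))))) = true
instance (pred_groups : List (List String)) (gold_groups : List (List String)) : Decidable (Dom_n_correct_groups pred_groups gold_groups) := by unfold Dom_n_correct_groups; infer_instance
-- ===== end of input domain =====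

-- B replaces A's max over all 24 permutations with a single greedy multiset-intersection pass (simpler, same results).


-- ===== PORT A =====
-- _norm(g) = frozenset(w.strip().upper() for w in g)
def pvNorm (g : List String) : PySem.Set String :=
  PySem.Set.ofList (g.map (fun w => PySem.Str.upper (PySem.Str.strip w)))

-- sum(1 for j in range(4) if pred_sets[j] == gold_sets[pi[j]])
def pvScoreA (pred_sets gold_sets : List (PySem.Set String)) (pi : List Int) : Int :=
  ((PySem.List.pyRange 0 4 1).map (fun j =>
    if PySem.Set.equal (PySem.List.pyGetD pred_sets j [])
        (PySem.List.pyGetD gold_sets (PySem.List.pyGetD pi j 0) []) then (1 : Int) else 0)).sum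

def n_correct_groups (pred_groups : List (List String)) (gold_groups : List (List String)) : Int :=
  if pred_groups = [] ∨ pred_groups.length ≠ 4 ∨ gold_groups.length ≠ 4 then 0
  else if (pred_groups.any fun g => decide (g.length ≠ 4)) = true
        ∨ (gold_groups.any fun g => decide (g.length ≠ 4)) = true then 0
  else
    let pred_sets := pred_groups.map pvNorm
    let gold_sets := gold_groups.map pvNorm
    -- max(...) over the 24 permutations; the list is never empty, so the default is never used
    (PySem.List.max? ((PySem.List.permutations (PySem.List.pyRange 0 4 1) 4).map
        (pvScoreA pred_sets gold_sets)) (fun x => x)).getD 0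

-- ===== PORT B =====
-- gold_left.remove(s): drop the first element that is set-equal to s
def pvRemoveFirstEq (gl : List (PySem.Set String)) (s : PySem.Set String) : List (PySem.Set String) :=
  match gl with
  | [] => []
  | x :: xs => if PySem.Set.equal x s then xs else x :: pvRemoveFirstEq xs s

-- the 'for g in pred_groups' loop with accumulator n
def pvGreedy (preds : List (List String)) (gl : List (PySem.Set String)) (n : Int) : Int :=
  match preds with
  | [] => n
  | g :: rest =>
    let s := pvNorm g
    if gl.any (fun x => PySem.Set.equal x s) then pvGreedy rest (pvRemoveFirstEq gl s) (n + 1)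
    else pvGreedy rest gl n

def n_correct_groups_alt (pred_groups : List (List String)) (gold_groups : List (List String)) : Int :=
  if pred_groups = [] ∨ pred_groups.length ≠ 4 ∨ gold_groups.length ≠ 4 then 0
  else if (pred_groups.any fun g => decide (g.length ≠ 4)) = true
        ∨ (gold_groups.any fun g => decide (g.length ≠ 4)) = true then 0
  else pvGreedy pred_groups (gold_groups.map pvNorm) 0

-- ===== PRECONDITION & SPEC =====
def Spec_n_correct_groups (pred_groups : List (List String)) (gold_groups : List (List String)) (out : Int) : Prop := out = n_correct_groups_alt pred_groups gold_groups
instance (pred_groups : List (List String)) (gold_groups : List (List String)) (out : Int) : Decidable (Spec_n_correct_groups pred_groups gold_groups out) := by unfold Spec_n_correct_groups; infer_instance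

-- ===== CLAIM (what is proved, stated in full; the proofs are below) =====
def Claim_equal_n_correct_groups : Prop := ∀ (pred_groups : List (List String)) (gold_groups : List (List String)), Dom_n_correct_groups pred_groups gold_groups → Spec_n_correct_groups pred_groups gold_groups (n_correct_groups pred_groups gold_groups)

-- ===== LEMMAS AND PROOFS =====

-- canonical representative of a set of strings: its sorted element list
def pvCanon (s : List String) : List String := PySem.List.sorted s (fun x => x) false

-- positional match count of two lists of canonical sets
def pvMatch : List (List String) → List (List String) → Int
  | [], _ => 0
  | _ :: _, [] => 0
  | p :: P, g :: G => (if p = g then (1 : Int) else 0) + pvMatch P G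

-- greedy multiset-intersection count on canonical lists
def pvInter : List (List String) → List (List String) → Int
  | [], _ => 0
  | p :: P, G => if p ∈ G then 1 + pvInter P (G.erase p) else pvInter P G

-- Python's frozenset equality is equality of canonical (sorted) element lists
theorem pvSet_equal_canon {s t : List String} (hs : s.Nodup) (ht : t.Nodup) :
    PySem.Set.equal s t = decide (pvCanon s = pvCanon t) := by
  by_cases h : pvCanon s = pvCanon t
  · simp only [h, decide_true]
    exact (PySem.Set.equal_iff s t).mpr
      (fun x => (List.Perm.mem_iff ((PySem.List.sorted_id_eq_sorted_id_iff_perm s t).mp h)))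
  · simp only [h, decide_false]
    by_contra hne
    have heq : PySem.Set.equal s t = true := by
      cases he : PySem.Set.equal s t
      · exact absurd he hne
      · rfl
    exact h ((PySem.List.sorted_id_eq_sorted_id_iff_perm s t).mpr
      ((List.perm_ext_iff_of_nodup hs ht).mpr ((PySem.Set.equal_iff s t).mp heq)))

theorem pvInter_nonneg (P : List (List String)) :
    ∀ (G : List (List String)), 0 ≤ pvInter P G := by
  induction P with
  | nil => intro G; simp [pvInter]
  | cons p P ih =>
    intro G
    by_cases hpG : p ∈ G
    · simp only [pvInter, if_pos hpG]; have := ih (G.erase p); omega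
    · simp only [pvInter, if_neg hpG]; exact ih G

theorem pvInter_erase_le (P : List (List String)) :
    ∀ (G : List (List String)) (x : List String), pvInter P (G.erase x) ≤ pvInter P G := by
  induction P with
  | nil => intro G x; simp [pvInter]
  | cons p P ih =>
    intro G x
    by_cases hpx : p ∈ G.erase x
    · have hpG : p ∈ G := List.mem_of_mem_erase hpx
      simp only [pvInter, if_pos hpx, if_pos hpG]
      have := ih (G.erase p) x
      rw [List.erase_comm] at this
      omega
    · by_cases hpG : p ∈ G
      · have hxp : x = p := by
          by_contra hne
          exact hpx ((List.mem_erase_of_ne (fun he => hne he.symm)).mpr hpG)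
        subst hxp
        simp only [pvInter, if_neg hpx, if_pos hpG]
        omega
      · simp only [pvInter, if_neg hpx, if_neg hpG]
        exact ih G x

theorem pvInter_le_erase_add_one (P : List (List String)) :
    ∀ (G : List (List String)) (x : List String), pvInter P G ≤ pvInter P (G.erase x) + 1 := by
  induction P with
  | nil => intro G x; simp [pvInter]
  | cons p P ih =>
    intro G x
    by_cases hpx : p ∈ G.erase x
    · have hpG : p ∈ G := List.mem_of_mem_erase hpx
      simp only [pvInter, if_pos hpx, if_pos hpG]
      have := ih (G.erase p) x
      rw [List.erase_comm] at this
      omega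
    · by_cases hpG : p ∈ G
      · have hxp : x = p := by
          by_contra hne
          exact hpx ((List.mem_erase_of_ne (fun he => hne he.symm)).mpr hpG)
        subst hxp
        simp only [pvInter, if_neg hpx, if_pos hpG]
        omega
      · simp only [pvInter, if_neg hpx, if_neg hpG]
        exact ih G x

-- any positional matching against a rearrangement of G is at most the multiset intersection
theorem pvMatch_le_inter (P : List (List String)) :
    ∀ (G' G : List (List String)), G'.Perm G → pvMatch P G' ≤ pvInter P G := by
  induction P with
  | nil => intro G' G _; cases G' <;> simp [pvMatch, pvInter]
  | cons p P ih =>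
    intro G' G hperm
    cases G' with
    | nil =>
      have h0 : G = [] := hperm.symm.eq_nil
      subst h0
      simp only [pvMatch, pvInter]
      split
      · have := pvInter_nonneg P ([].erase p); omega
      · exact pvInter_nonneg P []
    | cons g G'' =>
      have hgG : g ∈ G := hperm.mem_iff.mp (List.mem_cons_self)
      have hG'' : G''.Perm (G.erase g) := (List.cons_perm_iff_perm_erase.mp hperm).2
      by_cases hpg : p = g
      · subst hpg
        have hm : pvMatch (p :: P) (p :: G'') = 1 + pvMatch P G'' := by
          simp [pvMatch]
        rw [hm]
        simp only [pvInter, if_pos hgG]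
        have := ih G'' (G.erase p) hG''
        omega
      · simp only [pvMatch, pvInter, if_neg hpg]
        have h1 := ih G'' (G.erase g) hG''
        by_cases hpG : p ∈ G
        · simp only [if_pos hpG]
          have h2 := pvInter_erase_le P G g
          have h3 := pvInter_le_erase_add_one P G p
          omega
        · simp only [if_neg hpG]
          have h2 := pvInter_erase_le P G g
          omega

-- when G is strictly longer than P, some element of G is not needed by the greedy count
theorem pvExists_drop (P : List (List String)) :
    ∀ (G : List (List String)), P.length < G.length →
      ∃ g ∈ G, pvInter P G ≤ pvInter P (G.erase g) := by
  induction P with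
  | nil =>
    intro G hlen
    cases G with
    | nil => simp at hlen
    | cons g G => exact ⟨g, List.mem_cons_self, by simp [pvInter]⟩
  | cons p P ih =>
    intro G hlen
    by_cases hpG : p ∈ G
    · have hlen' : P.length < (G.erase p).length := by
        have := List.length_erase_of_mem hpG
        simp at hlen ⊢
        omega
      obtain ⟨g, hg, hle⟩ := ih (G.erase p) hlen'
      have hgG : g ∈ G := List.mem_of_mem_erase hg
      refine ⟨g, hgG, ?_⟩
      have hpGg : p ∈ G.erase g := by
        by_cases hgp : g = p
        · subst hgp; exact hg
        · exact (List.mem_erase_of_ne (fun he => hgp he.symm)).mpr hpG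
      simp only [pvInter, if_pos hpG, if_pos hpGg]
      rw [List.erase_comm] at hle
      omega
    · have hlen' : P.length < G.length := by simp at hlen; omega
      obtain ⟨g, hg, hle⟩ := ih G hlen'
      refine ⟨g, hg, ?_⟩
      have hpGg : p ∉ G.erase g := fun h => hpG (List.mem_of_mem_erase h)
      simp only [pvInter, if_neg hpG, if_neg hpGg]
      exact hle

-- some rearrangement of G realizes the multiset-intersection count positionally
theorem pvExists_perm (P : List (List String)) :
    ∀ (G : List (List String)), P.length ≤ G.length →
      ∃ G', G'.Perm G ∧ pvInter P G ≤ pvMatch P G' := by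
  induction P with
  | nil => intro G _; exact ⟨G, List.Perm.refl G, by simp [pvInter, pvMatch]⟩
  | cons p P ih =>
    intro G hlen
    by_cases hpG : p ∈ G
    · have hlen' : P.length ≤ (G.erase p).length := by
        have := List.length_erase_of_mem hpG
        simp at hlen ⊢
        omega
      obtain ⟨G'', hperm, hle⟩ := ih (G.erase p) hlen'
      refine ⟨p :: G'', (hperm.cons p).trans (List.perm_cons_erase hpG).symm, ?_⟩
      have hm : pvMatch (p :: P) (p :: G'') = 1 + pvMatch P G'' := by
        simp [pvMatch]
      rw [hm]
      simp only [pvInter, if_pos hpG]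
      omega
    · have hlt : P.length < G.length := by simp at hlen; omega
      obtain ⟨g, hgG, hdrop⟩ := pvExists_drop P G hlt
      have hlen' : P.length ≤ (G.erase g).length := by
        have := List.length_erase_of_mem hgG
        omega
      obtain ⟨G'', hperm, hle⟩ := ih (G.erase g) hlen'
      refine ⟨g :: G'', (hperm.cons g).trans (List.perm_cons_erase hgG).symm, ?_⟩
      have hpg : p ≠ g := fun he => hpG (he ▸ hgG)
      simp only [pvMatch, pvInter, if_neg hpg, if_neg hpG]
      omega

-- the canonical-level inner score of port A
def pvScoreC (P G : List (List String)) (pi : List Int) : Int :=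
  ((PySem.List.pyRange 0 4 1).map (fun j =>
    if PySem.List.pyGetD P j [] = PySem.List.pyGetD G (PySem.List.pyGetD pi j 0) []
    then (1 : Int) else 0)).sum

def pvL24 : List (List Int) := PySem.List.permutations (PySem.List.pyRange 0 4 1) 4

theorem pvGetD_mem_or_default {α : Type} (xs : List α) (i : Int) (d : α) :
    PySem.List.pyGetD xs i d ∈ xs ∨ PySem.List.pyGetD xs i d = d := by
  unfold PySem.List.pyGetD
  cases h : PySem.List.pyGet? xs i with
  | none => right; rfl
  | some v =>
    left
    unfold PySem.List.pyGet? at h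
    cases hk : PySem.List.pyIdx? xs.length i with
    | none => rw [hk] at h; simp at h
    | some k =>
      rw [hk] at h; simp at h
      exact List.mem_of_getElem? h

theorem pvGetD_nodup (ps : List (PySem.Set String)) (h : ∀ s ∈ ps, s.Nodup) (j : Int) :
    (PySem.List.pyGetD ps j []).Nodup := by
  rcases pvGetD_mem_or_default ps j [] with hm | he
  · exact h _ hm
  · rw [he]; exact List.nodup_nil

-- A's inner score, with frozenset equality replaced by equality of canonical lists
theorem pvScoreA_canon (ps gs : List (PySem.Set String))
    (hps : ∀ s ∈ ps, s.Nodup) (hgs : ∀ s ∈ gs, s.Nodup) (pi : List Int) :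
    pvScoreA ps gs pi = pvScoreC (ps.map pvCanon) (gs.map pvCanon) pi := by
  unfold pvScoreA pvScoreC
  congr 1
  apply List.map_congr_left
  intro j _
  rw [pvSet_equal_canon (pvGetD_nodup ps hps j) (pvGetD_nodup gs hgs _)]
  rw [show ([] : List String) = pvCanon [] from rfl,
      PySem.List.pyGetD_map pvCanon ps j [], PySem.List.pyGetD_map pvCanon gs _ []]
  simp only [decide_eq_true_eq, show pvCanon ([] : List String) = [] from rfl]

theorem pvScoreC_eq_match (P G : List (List String)) (hP : P.length = 4) (hG : G.length = 4)
    {pi : List Int} (hpi : pi ∈ pvL24) :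
    pvScoreC P G pi = pvMatch P (pi.map (fun i => PySem.List.pyGetD G i [])) := by
  rcases P with _|⟨p0,_|⟨p1,_|⟨p2,_|⟨p3,_|⟨p4,t⟩⟩⟩⟩⟩ <;> simp_all
  rcases G with _|⟨g0,_|⟨g1,_|⟨g2,_|⟨g3,_|⟨g4,t⟩⟩⟩⟩⟩ <;> simp_all
  fin_cases hpi <;> rfl

theorem pvRearr_perm (G : List (List String)) (hG : G.length = 4)
    {pi : List Int} (hpi : pi ∈ pvL24) :
    (pi.map (fun i => PySem.List.pyGetD G i [])).Perm G := by
  rcases G with _|⟨g0,_|⟨g1,_|⟨g2,_|⟨g3,_|⟨g4,t⟩⟩⟩⟩⟩ <;> simp_all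
  fin_cases hpi
  · refine List.perm_iff_count.mpr fun a => ?_
    rfl
  · refine List.perm_iff_count.mpr fun a => ?_
    show List.count a [g0,g1,g3,g2] = List.count a [g0,g1,g2,g3]
    simp only [List.count_cons, List.count_nil]
    split_ifs <;> omega
  · refine List.perm_iff_count.mpr fun a => ?_
    show List.count a [g0,g2,g1,g3] = List.count a [g0,g1,g2,g3]
    simp only [List.count_cons, List.count_nil]
    split_ifs <;> omega
  · refine List.perm_iff_count.mpr fun a => ?_
    show List.count a [g0,g2,g3,g1] = List.count a [g0,g1,g2,g3]
    simp only [List.count_cons, List.count_nil]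
    split_ifs <;> omega
  · refine List.perm_iff_count.mpr fun a => ?_
    show List.count a [g0,g3,g1,g2] = List.count a [g0,g1,g2,g3]
    simp only [List.count_cons, List.count_nil]
    split_ifs <;> omega
  · refine List.perm_iff_count.mpr fun a => ?_
    show List.count a [g0,g3,g2,g1] = List.count a [g0,g1,g2,g3]
    simp only [List.count_cons, List.count_nil]
    split_ifs <;> omega
  · refine List.perm_iff_count.mpr fun a => ?_
    show List.count a [g1,g0,g2,g3] = List.count a [g0,g1,g2,g3]
    simp only [List.count_cons, List.count_nil]
    split_ifs <;> omega
  · refine List.perm_iff_count.mpr fun a => ?_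
    show List.count a [g1,g0,g3,g2] = List.count a [g0,g1,g2,g3]
    simp only [List.count_cons, List.count_nil]
    split_ifs <;> omega
  · refine List.perm_iff_count.mpr fun a => ?_
    show List.count a [g1,g2,g0,g3] = List.count a [g0,g1,g2,g3]
    simp only [List.count_cons, List.count_nil]
    split_ifs <;> omega
  · refine List.perm_iff_count.mpr fun a => ?_
    show List.count a [g1,g2,g3,g0] = List.count a [g0,g1,g2,g3]
    simp only [List.count_cons, List.count_nil]
    split_ifs <;> omega
  · refine List.perm_iff_count.mpr fun a => ?_
    show List.count a [g1,g3,g0,g2] = List.count a [g0,g1,g2,g3]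
    simp only [List.count_cons, List.count_nil]
    split_ifs <;> omega
  · refine List.perm_iff_count.mpr fun a => ?_
    show List.count a [g1,g3,g2,g0] = List.count a [g0,g1,g2,g3]
    simp only [List.count_cons, List.count_nil]
    split_ifs <;> omega
  · refine List.perm_iff_count.mpr fun a => ?_
    show List.count a [g2,g0,g1,g3] = List.count a [g0,g1,g2,g3]
    simp only [List.count_cons, List.count_nil]
    split_ifs <;> omega
  · refine List.perm_iff_count.mpr fun a => ?_
    show List.count a [g2,g0,g3,g1] = List.count a [g0,g1,g2,g3]
    simp only [List.count_cons, List.count_nil]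
    split_ifs <;> omega
  · refine List.perm_iff_count.mpr fun a => ?_
    show List.count a [g2,g1,g0,g3] = List.count a [g0,g1,g2,g3]
    simp only [List.count_cons, List.count_nil]
    split_ifs <;> omega
  · refine List.perm_iff_count.mpr fun a => ?_
    show List.count a [g2,g1,g3,g0] = List.count a [g0,g1,g2,g3]
    simp only [List.count_cons, List.count_nil]
    split_ifs <;> omega
  · refine List.perm_iff_count.mpr fun a => ?_
    show List.count a [g2,g3,g0,g1] = List.count a [g0,g1,g2,g3]
    simp only [List.count_cons, List.count_nil]
    split_ifs <;> omega
  · refine List.perm_iff_count.mpr fun a => ?_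
    show List.count a [g2,g3,g1,g0] = List.count a [g0,g1,g2,g3]
    simp only [List.count_cons, List.count_nil]
    split_ifs <;> omega
  · refine List.perm_iff_count.mpr fun a => ?_
    show List.count a [g3,g0,g1,g2] = List.count a [g0,g1,g2,g3]
    simp only [List.count_cons, List.count_nil]
    split_ifs <;> omega
  · refine List.perm_iff_count.mpr fun a => ?_
    show List.count a [g3,g0,g2,g1] = List.count a [g0,g1,g2,g3]
    simp only [List.count_cons, List.count_nil]
    split_ifs <;> omega
  · refine List.perm_iff_count.mpr fun a => ?_
    show List.count a [g3,g1,g0,g2] = List.count a [g0,g1,g2,g3]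
    simp only [List.count_cons, List.count_nil]
    split_ifs <;> omega
  · refine List.perm_iff_count.mpr fun a => ?_
    show List.count a [g3,g1,g2,g0] = List.count a [g0,g1,g2,g3]
    simp only [List.count_cons, List.count_nil]
    split_ifs <;> omega
  · refine List.perm_iff_count.mpr fun a => ?_
    show List.count a [g3,g2,g0,g1] = List.count a [g0,g1,g2,g3]
    simp only [List.count_cons, List.count_nil]
    split_ifs <;> omega
  · refine List.perm_iff_count.mpr fun a => ?_
    show List.count a [g3,g2,g1,g0] = List.count a [g0,g1,g2,g3]
    simp only [List.count_cons, List.count_nil]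
    split_ifs <;> omega

theorem pvRearr_complete (G G' : List (List String)) (hG : G.length = 4) (h : G'.Perm G) :
    ∃ pi ∈ pvL24, pi.map (fun i => PySem.List.pyGetD G i []) = G' := by
  rcases G with _|⟨g0,_|⟨g1,_|⟨g2,_|⟨g3,_|⟨g4,t⟩⟩⟩⟩⟩ <;> simp_all
  have hm : G' ∈ List.permutations' [g0,g1,g2,g3] := List.mem_permutations'.mpr h
  rw [show List.permutations' [g0,g1,g2,g3] = ([[g0,g1,g2,g3],[g1,g0,g2,g3],[g1,g2,g0,g3],[g1,g2,g3,g0],[g0,g2,g1,g3],[g2,g0,g1,g3],[g2,g1,g0,g3],[g2,g1,g3,g0],[g0,g2,g3,g1],[g2,g0,g3,g1],[g2,g3,g0,g1],[g2,g3,g1,g0],[g0,g1,g3,g2],[g1,g0,g3,g2],[g1,g3,g0,g2],[g1,g3,g2,g0],[g0,g3,g1,g2],[g3,g0,g1,g2],[g3,g1,g0,g2],[g3,g1,g2,g0],[g0,g3,g2,g1],[g3,g0,g2,g1],[g3,g2,g0,g1],[g3,g2,g1,g0]] : List (List (List String))) from rfl] at hm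
  fin_cases hm
  · exact ⟨[(0:Int),1,2,3], by decide, rfl⟩
  · exact ⟨[(1:Int),0,2,3], by decide, rfl⟩
  · exact ⟨[(1:Int),2,0,3], by decide, rfl⟩
  · exact ⟨[(1:Int),2,3,0], by decide, rfl⟩
  · exact ⟨[(0:Int),2,1,3], by decide, rfl⟩
  · exact ⟨[(2:Int),0,1,3], by decide, rfl⟩
  · exact ⟨[(2:Int),1,0,3], by decide, rfl⟩
  · exact ⟨[(2:Int),1,3,0], by decide, rfl⟩
  · exact ⟨[(0:Int),2,3,1], by decide, rfl⟩
  · exact ⟨[(2:Int),0,3,1], by decide, rfl⟩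
  · exact ⟨[(2:Int),3,0,1], by decide, rfl⟩
  · exact ⟨[(2:Int),3,1,0], by decide, rfl⟩
  · exact ⟨[(0:Int),1,3,2], by decide, rfl⟩
  · exact ⟨[(1:Int),0,3,2], by decide, rfl⟩
  · exact ⟨[(1:Int),3,0,2], by decide, rfl⟩
  · exact ⟨[(1:Int),3,2,0], by decide, rfl⟩
  · exact ⟨[(0:Int),3,1,2], by decide, rfl⟩
  · exact ⟨[(3:Int),0,1,2], by decide, rfl⟩
  · exact ⟨[(3:Int),1,0,2], by decide, rfl⟩
  · exact ⟨[(3:Int),1,2,0], by decide, rfl⟩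
  · exact ⟨[(0:Int),3,2,1], by decide, rfl⟩
  · exact ⟨[(3:Int),0,2,1], by decide, rfl⟩
  · exact ⟨[(3:Int),2,0,1], by decide, rfl⟩
  · exact ⟨[(3:Int),2,1,0], by decide, rfl⟩

-- A's best-permutation count equals the greedy multiset-intersection count
theorem pvCore (P G : List (List String)) (hP : P.length = 4) (hG : G.length = 4) :
    (PySem.List.max? (pvL24.map (pvScoreC P G)) (fun x => x)).getD 0 = pvInter P G := by
  cases hmax : PySem.List.max? (pvL24.map (pvScoreC P G)) (fun x => x) with
  | none =>
    exfalso
    have h0 := (PySem.List.max?_eq_none_iff _ _).mp hmax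
    have : pvL24 = [] := List.map_eq_nil_iff.mp h0
    exact absurd this (by decide)
  | some m =>
    obtain ⟨pi, hpi, hmi⟩ := List.mem_map.mp (PySem.List.max?_mem hmax)
    have hle : m ≤ pvInter P G := by
      rw [← hmi, pvScoreC_eq_match P G hP hG hpi]
      exact pvMatch_le_inter P _ G (pvRearr_perm G hG hpi)
    have hge : pvInter P G ≤ m := by
      obtain ⟨G', hperm, hint⟩ := pvExists_perm P G (by omega)
      obtain ⟨pi', hpi', heq⟩ := pvRearr_complete G G' hG hperm
      have hsc : pvScoreC P G pi' = pvMatch P G' := by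
        rw [pvScoreC_eq_match P G hP hG hpi', heq]
      have hmx := PySem.List.max?_isMax hmax (pvScoreC P G pi') (List.mem_map_of_mem hpi')
      omega
    simp only [Option.getD_some]
    omega

theorem pvNorm_nodup (g : List String) : (pvNorm g).Nodup := PySem.Set.nodup_ofList _

theorem pvAny_eq (gl : List (PySem.Set String)) (hgl : ∀ x ∈ gl, x.Nodup)
    {s : PySem.Set String} (hs : s.Nodup) :
    (gl.any (fun x => PySem.Set.equal x s) = true) ↔ pvCanon s ∈ gl.map pvCanon := by
  rw [List.any_eq_true]
  constructor
  · rintro ⟨x, hx, he⟩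
    rw [pvSet_equal_canon (hgl x hx) hs, decide_eq_true_eq] at he
    exact he ▸ List.mem_map_of_mem hx
  · intro hm
    obtain ⟨x, hx, he⟩ := List.mem_map.mp hm
    exact ⟨x, hx, by rw [pvSet_equal_canon (hgl x hx) hs, decide_eq_true_eq]; exact he⟩

theorem pvMem_removeFirstEq {gl : List (PySem.Set String)} {s x : PySem.Set String}
    (h : x ∈ pvRemoveFirstEq gl s) : x ∈ gl := by
  induction gl with
  | nil => simp [pvRemoveFirstEq] at h
  | cons y ys ih =>
    unfold pvRemoveFirstEq at h
    split at h
    · exact List.mem_cons_of_mem y h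
    · rcases List.mem_cons.mp h with h' | h'
      · exact h' ▸ List.mem_cons_self
      · exact List.mem_cons_of_mem y (ih h')

theorem pvRemove_map (gl : List (PySem.Set String)) (hgl : ∀ x ∈ gl, x.Nodup)
    {s : PySem.Set String} (hs : s.Nodup) :
    (pvRemoveFirstEq gl s).map pvCanon = (gl.map pvCanon).erase (pvCanon s) := by
  induction gl with
  | nil => rfl
  | cons y ys ih =>
    have hy := hgl y List.mem_cons_self
    unfold pvRemoveFirstEq
    rw [pvSet_equal_canon hy hs]
    by_cases he : pvCanon y = pvCanon s
    · simp only [he, decide_true, if_true, List.map_cons, List.erase_cons]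
      rw [if_pos (by simp)]
    · have hd : (decide (pvCanon y = pvCanon s)) = false := by simp [he]
      rw [hd]
      simp only [Bool.false_eq_true, if_false, List.map_cons, List.erase_cons]
      rw [if_neg (by simpa using he)]
      rw [ih (fun x hx => hgl x (List.mem_cons_of_mem y hx))]

-- B's greedy loop computes the greedy multiset-intersection count on canonical lists
theorem pvGreedy_eq (preds : List (List String)) :
    ∀ (gl : List (PySem.Set String)), (∀ s ∈ gl, s.Nodup) → ∀ n : Int,
      pvGreedy preds gl n = n + pvInter ((preds.map pvNorm).map pvCanon) (gl.map pvCanon) := by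
  induction preds with
  | nil => intro gl _ n; simp [pvGreedy, pvInter]
  | cons g rest ih =>
    intro gl hgl n
    have hs := pvNorm_nodup g
    unfold pvGreedy
    simp only [List.map_cons, pvInter]
    by_cases hc : (gl.any (fun x => PySem.Set.equal x (pvNorm g)) = true)
    · rw [if_pos hc, if_pos ((pvAny_eq gl hgl hs).mp hc)]
      rw [ih (pvRemoveFirstEq gl (pvNorm g))
            (fun x hx => hgl x (pvMem_removeFirstEq hx)) (n + 1)]
      rw [pvRemove_map gl hgl hs]
      omega
    · rw [if_neg hc, if_neg (fun h => hc ((pvAny_eq gl hgl hs).mpr h))]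
      exact ih gl hgl n

-- ===== VERDICT (by name: the statement is the Claim_ definition above) =====
theorem n_correct_groups_spec : Claim_equal_n_correct_groups := by
  intro pred gold _
  unfold Spec_n_correct_groups n_correct_groups n_correct_groups_alt
  split_ifs with h1 h2
  · rfl
  · rfl
  · have hP : pred.length = 4 := by tauto
    have hG : gold.length = 4 := by tauto
    have hps : ∀ s ∈ pred.map pvNorm, List.Nodup s := by
      intro s hsm
      obtain ⟨g, _, rfl⟩ := List.mem_map.mp hsm
      exact pvNorm_nodup g
    have hgs : ∀ s ∈ gold.map pvNorm, List.Nodup s := by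
      intro s hsm
      obtain ⟨g, _, rfl⟩ := List.mem_map.mp hsm
      exact pvNorm_nodup g
    have hfun : pvScoreA (pred.map pvNorm) (gold.map pvNorm)
        = pvScoreC ((pred.map pvNorm).map pvCanon) ((gold.map pvNorm).map pvCanon) :=
      funext (pvScoreA_canon (pred.map pvNorm) (gold.map pvNorm) hps hgs)
    show (PySem.List.max? (pvL24.map (pvScoreA (pred.map pvNorm) (gold.map pvNorm))) (fun x => x)).getD 0
        = pvGreedy pred (gold.map pvNorm) 0
    rw [hfun,
        pvCore ((pred.map pvNorm).map pvCanon) ((gold.map pvNorm).map pvCanon)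
          (by simp [hP]) (by simp [hG]),
        pvGreedy_eq pred (gold.map pvNorm) hgs 0]
    omega
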